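-- pv_equiv track=rewrite | github.com/ashish8513/Leetcode-dsa | Dsa/3721. Longest Balanced Subarray II.py | longestBalanced
-- ===== SOURCE A (Python) =====
-- from typing import List
--
-- def longestBalanced(nums: List[int]) -> int:
--     n = len(nums)
--     max_len = 0
--
--     for i in range(n):
--         even_set = set()
--         odd_set = set()
--
--         for j in range(i, n):
--             if nums[j] % 2 == 0:
--                 even_set.add(nums[j])
--             else:
--                 odd_set.add(nums[j])
--
--             if len(even_set) == len(odd_set):
--                 max_len = max(max_len, j - i + 1)
--
--     return max_len
-- ===== SOURCE B (Python) =====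
-- from typing import List
--
-- def longestBalanced(nums: List[int]) -> int:
--     # Sweep the right end j; scan left maintaining one integer distinct-balance
--     # via a last-occurrence index map (no per-window sets).
--     last = {}
--     best = 0
--     for j in range(len(nums)):
--         last[nums[j]] = j
--         bal = 0
--         for i in range(j, -1, -1):
--             if last.get(nums[i], -1) == i:
--                 bal += 1 if nums[i] % 2 == 0 else -1
--             if bal == 0:
--                 best = max(best, j - i + 1)
--     return best
-- ===== Notes on version B (the rewrite author's own statement) =====
-- stated objective: alternative
-- what changed: A grows a window to the right from each start maintaining two distinct-value sets; B sweeps each right end and scans left with a single integer distinct-balance read off a last-occurrence index map, so the per-window sets disappear.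
import Mathlib
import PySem

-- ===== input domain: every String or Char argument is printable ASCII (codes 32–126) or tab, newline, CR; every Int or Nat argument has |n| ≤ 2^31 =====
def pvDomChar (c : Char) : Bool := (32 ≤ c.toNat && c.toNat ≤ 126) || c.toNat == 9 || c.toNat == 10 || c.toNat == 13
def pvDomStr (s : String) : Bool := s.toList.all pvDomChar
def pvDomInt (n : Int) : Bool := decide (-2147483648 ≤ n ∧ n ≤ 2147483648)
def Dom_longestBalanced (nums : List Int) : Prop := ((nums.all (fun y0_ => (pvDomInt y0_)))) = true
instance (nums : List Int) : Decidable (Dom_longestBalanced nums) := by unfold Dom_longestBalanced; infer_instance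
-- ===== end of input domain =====

-- B replaces A's per-start pair of distinct-value sets by a right-to-left sweep per right
-- end, keeping one integer distinct-balance read off a last-occurrence index map
-- (objective: alternative traversal of the same O(n^2) cost).

-- ===== PORT A =====
-- inner-loop body of A: updates (even_set, odd_set, max_len) at index j (window start i)
def pvBodyA (nums : List Int) (i : Int) (st : PySem.Set Int × PySem.Set Int × Int) (j : Int) :
    PySem.Set Int × PySem.Set Int × Int :=
  let x := PySem.List.pyGetD nums j 0
  let es := if PySem.Int.mod x 2 = 0 then PySem.Set.add st.1 x else st.1
  let os := if PySem.Int.mod x 2 = 0 then st.2.1 else PySem.Set.add st.2.1 x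
  let m := if PySem.Set.len es = PySem.Set.len os then max st.2.2 (j - i + 1) else st.2.2
  (es, os, m)

def longestBalanced (nums : List Int) : Int :=
  let n : Int := nums.length
  (PySem.List.pyRange 0 n 1).foldl (fun maxLen i =>
    ((PySem.List.pyRange i n 1).foldl (pvBodyA nums i)
      (PySem.Set.empty, PySem.Set.empty, maxLen)).2.2) 0

-- ===== PORT B =====
-- inner-loop body of B: balance/best update at left end i (right end j, last-occurrence map `last`)
def pvBodyB (nums : List Int) (last : PySem.Dict Int Int) (j : Int) (t : Int × Int) (i : Int) :
    Int × Int :=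
  let x := PySem.List.pyGetD nums i 0
  let bal := if last.getD x (-1) = i then t.1 + (if PySem.Int.mod x 2 = 0 then 1 else -1) else t.1
  let best := if bal = 0 then max t.2 (j - i + 1) else t.2
  (bal, best)

-- outer-loop body of B: record last occurrence of nums[j], then sweep i from j down to 0
def pvStepB (nums : List Int) (st : PySem.Dict Int Int × Int) (j : Int) :
    PySem.Dict Int Int × Int :=
  let last := st.1.insert (PySem.List.pyGetD nums j 0) j
  let res := (PySem.List.pyRange j (-1) (-1)).foldl (pvBodyB nums last j) ((0 : Int), st.2)
  (last, res.2)

def longestBalanced_alt (nums : List Int) : Int :=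
  ((PySem.List.pyRange 0 (nums.length : Int) 1).foldl (pvStepB nums)
    (PySem.Dict.empty, 0)).2

-- ===== PRECONDITION & SPEC =====
def Spec_longestBalanced (nums : List Int) (out : Int) : Prop := out = longestBalanced_alt nums
instance (nums : List Int) (out : Int) : Decidable (Spec_longestBalanced nums out) := by unfold Spec_longestBalanced; infer_instance

-- ===== CLAIM (what is proved, stated in full; the proofs are below) =====
def Claim_equal_longestBalanced : Prop := ∀ (nums : List Int), Dom_longestBalanced nums → Spec_longestBalanced nums (longestBalanced nums)

-- ===== LEMMAS AND PROOFS =====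

-- parity test of both programs, as a Bool
def pvEvenB (x : Int) : Bool := decide (PySem.Int.mod x 2 = 0)
-- the window nums[i..j] (inclusive)
def pvWin (nums : List Int) (i j : ℕ) : List Int := (nums.drop i).take (j + 1 - i)
-- number of distinct even / odd values of a list
def pvDE (l : List Int) : ℕ := (l.filter (fun x => pvEvenB x)).toFinset.card
def pvDO (l : List Int) : ℕ := (l.filter (fun x => !pvEvenB x)).toFinset.card
-- contribution of the window (i, j): its length if balanced (and i ≤ j), else 0
def pvG (nums : List Int) (i j : ℕ) : ℕ :=
  if i ≤ j ∧ pvDE (pvWin nums i j) = pvDO (pvWin nums i j) then j - i + 1 else 0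
-- signed distinct balance of the window (i, j)
def pvDelta (nums : List Int) (i j : ℕ) : Int :=
  (pvDE (pvWin nums i j) : Int) - (pvDO (pvWin nums i j) : Int)
-- the last-occurrence dictionary after processing indices 0..t-1
def pvDict (nums : List Int) : ℕ → PySem.Dict Int Int
  | 0 => PySem.Dict.empty
  | t + 1 => (pvDict nums t).insert (nums.getD t 0) (t : Int)

theorem pv_sup_range_succ (n : ℕ) (f : ℕ → ℕ) :
    (Finset.range (n+1)).sup f = (Finset.range n).sup f ⊔ f n := by
  rw [Finset.range_add_one, Finset.sup_insert]; exact sup_comm _ _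

theorem pv_len_ofList (l : List Int) : (PySem.Set.ofList l).length = l.toFinset.card := by
  have h1 : (PySem.Set.ofList l).toFinset = l.toFinset := by
    ext x; simp [PySem.Set.mem_ofList]
  rw [← h1, List.toFinset_card_of_nodup (PySem.Set.nodup_ofList l)]

theorem pv_ofList_append (l : List Int) (x : Int) :
    PySem.Set.ofList (l ++ [x]) = PySem.Set.add (PySem.Set.ofList l) x := by
  simp [PySem.Set.ofList_eq_foldl]

theorem pvG_zero_of_lt (nums : List Int) (i j : ℕ) (h : j < i) : pvG nums i j = 0 := by
  simp [pvG]; omega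

-- window grows on the right
theorem pvWin_snoc (nums : List Int) (i k : ℕ) (hik : i ≤ k) (hk : k < nums.length) :
    pvWin nums i k = (nums.drop i).take (k - i) ++ [nums.getD k 0] := by
  unfold pvWin
  rw [show k + 1 - i = (k - i) + 1 by omega, List.take_add_one]
  simp [List.getElem?_drop, show i + (k - i) = k by omega, hk, List.getD]

-- window grows on the left
theorem pvWin_cons (nums : List Int) (i j : ℕ) (hij : i ≤ j) (hi : i < nums.length) :
    pvWin nums i j = nums.getD i 0 :: pvWin nums (i+1) j := by
  unfold pvWin
  rw [List.drop_eq_getElem_cons hi, show j + 1 - i = (j - i) + 1 by omega, List.take_succ_cons,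
    show j - i = j + 1 - (i + 1) by omega]
  simp [List.getD, hi]

theorem pvWin_empty (nums : List Int) (j : ℕ) : pvWin nums (j+1) j = [] := by
  simp [pvWin]

-- ==== A side ====

theorem pv_innerA (nums : List Int) (i : ℕ) (m : Int) (hm : 0 ≤ m) :
    ∀ k, i ≤ k → k ≤ nums.length →
    (PySem.List.pyRange (i : Int) (k : Int) 1).foldl (pvBodyA nums (i : Int))
      (PySem.Set.empty, PySem.Set.empty, m)
    = (PySem.Set.ofList (((nums.drop i).take (k - i)).filter (fun x => pvEvenB x)),
       PySem.Set.ofList (((nums.drop i).take (k - i)).filter (fun x => !pvEvenB x)),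
       max m (((Finset.range k).sup (fun j => pvG nums i j) : ℕ) : Int)) := by
  intro k hik
  induction k, hik using Nat.le_induction with
  | base =>
    intro _
    rw [PySem.List.pyRange_one_eq_nil le_rfl]
    have hsup : (Finset.range i).sup (fun j => pvG nums i j) = 0 :=
      Nat.le_zero.mp (Finset.sup_le fun j hj => by
        rw [pvG_zero_of_lt nums i j (Finset.mem_range.mp hj)])
    simp [hsup, max_eq_left hm, PySem.Set.empty]
  | succ k hik ih =>
    intro hk1
    have hk : k < nums.length := by omega
    have hr : PySem.List.pyRange (i : Int) ((k+1 : ℕ) : Int) 1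
        = PySem.List.pyRange (i : Int) (k : Int) 1 ++ [(k : Int)] := by
      push_cast
      exact PySem.List.pyRange_one_succ_right (by exact_mod_cast hik)
    rw [hr, List.foldl_append, ih (by omega)]
    show pvBodyA nums (i : Int) _ (k : Int) = _
    unfold pvBodyA
    have hx : PySem.List.pyGetD nums (k : Int) 0 = nums.getD k 0 := by
      simp [PySem.List.pyGetD_natCast]
    rw [hx]
    have hw : pvWin nums i k = (nums.drop i).take (k - i) ++ [nums.getD k 0] :=
      pvWin_snoc nums i k hik hk
    have hwk : (nums.drop i).take (k + 1 - i) = pvWin nums i k := rfl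
    rw [hwk, hw]
    set x := nums.getD k 0 with hxdef
    set l := (nums.drop i).take (k - i) with hldef
    have hfe : (l ++ [x]).filter (fun x => pvEvenB x)
        = l.filter (fun x => pvEvenB x) ++ if pvEvenB x then [x] else [] := by
      simp [List.filter_append]; split <;> simp_all
    have hfo : (l ++ [x]).filter (fun x => !pvEvenB x)
        = l.filter (fun x => !pvEvenB x) ++ if pvEvenB x then [] else [x] := by
      simp [List.filter_append]; split <;> simp_all
    have hevb : pvEvenB x = true ↔ PySem.Int.mod x 2 = 0 := by
      simp only [pvEvenB, decide_eq_true_eq]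
    have hes : (if PySem.Int.mod x 2 = 0 then PySem.Set.add (PySem.Set.ofList (l.filter (fun x => pvEvenB x))) x
        else PySem.Set.ofList (l.filter (fun x => pvEvenB x)))
        = PySem.Set.ofList ((l ++ [x]).filter (fun x => pvEvenB x)) := by
      by_cases hev : PySem.Int.mod x 2 = 0
      · rw [if_pos hev, hfe, if_pos (hevb.mpr hev), pv_ofList_append]
      · rw [if_neg hev, hfe, if_neg (fun hb => hev (hevb.mp hb)), List.append_nil]
    have hos : (if PySem.Int.mod x 2 = 0 then PySem.Set.ofList (l.filter (fun x => !pvEvenB x))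
        else PySem.Set.add (PySem.Set.ofList (l.filter (fun x => !pvEvenB x))) x)
        = PySem.Set.ofList ((l ++ [x]).filter (fun x => !pvEvenB x)) := by
      by_cases hev : PySem.Int.mod x 2 = 0
      · rw [if_pos hev, hfo, if_pos (hevb.mpr hev), List.append_nil]
      · rw [if_neg hev, hfo, if_neg (fun hb => hev (hevb.mp hb)), pv_ofList_append]
    simp only [hes, hos, Prod.mk.injEq]
    refine ⟨trivial, trivial, ?_⟩
    have hlen : (PySem.Set.len (PySem.Set.ofList ((l ++ [x]).filter (fun x => pvEvenB x)))
          = PySem.Set.len (PySem.Set.ofList ((l ++ [x]).filter (fun x => !pvEvenB x))))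
        ↔ pvDE (pvWin nums i k) = pvDO (pvWin nums i k) := by
      rw [hw]
      simp [PySem.Set.len, pv_len_ofList, pvDE, pvDO]
    have hsup := pv_sup_range_succ k (fun j => pvG nums i j)
    by_cases hc : pvDE (pvWin nums i k) = pvDO (pvWin nums i k)
    · rw [if_pos (hlen.mpr hc)]
      have hg : pvG nums i k = k - i + 1 := by simp [pvG, hik, hc]
      rw [hsup, hg]
      have : (((Finset.range k).sup (fun j => pvG nums i j) ⊔ (k - i + 1) : ℕ) : Int)
          = max (((Finset.range k).sup (fun j => pvG nums i j) : ℕ) : Int) ((k : Int) - (i : Int) + 1) := by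
        push_cast [Nat.cast_max]
        congr 1
        omega
      rw [this, max_assoc]
    · rw [if_neg (fun h => hc (hlen.mp h))]
      have hg : pvG nums i k = 0 := by simp [pvG, hc]
      rw [hsup, hg]
      simp

theorem pv_outerA (nums : List Int) :
    ∀ t, t ≤ nums.length →
    (PySem.List.pyRange 0 (t : Int) 1).foldl (fun maxLen i =>
      ((PySem.List.pyRange i (nums.length : Int) 1).foldl (pvBodyA nums i)
        (PySem.Set.empty, PySem.Set.empty, maxLen)).2.2) 0
    = (((Finset.range t).sup (fun i => (Finset.range nums.length).sup (fun j => pvG nums i j)) : ℕ) : Int) := by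
  intro t
  induction t with
  | zero => intro _; simp [PySem.List.pyRange_one_eq_nil]
  | succ t ih =>
    intro ht
    have hr : PySem.List.pyRange 0 ((t+1 : ℕ) : Int) 1
        = PySem.List.pyRange 0 (t : Int) 1 ++ [(t : Int)] := by
      push_cast
      exact PySem.List.pyRange_one_succ_right (by positivity)
    rw [hr, List.foldl_append, ih (by omega)]
    show ((PySem.List.pyRange (t : Int) (nums.length : Int) 1).foldl (pvBodyA nums (t : Int))
      (PySem.Set.empty, PySem.Set.empty, _)).2.2 = _
    rw [pv_innerA nums t _ (by positivity) nums.length (by omega) le_rfl]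
    rw [pv_sup_range_succ t (fun i => (Finset.range nums.length).sup (fun j => pvG nums i j))]
    push_cast [Nat.cast_max]
    rfl

-- ==== B side ====

theorem pv_getD_pvDict (nums : List Int) :
    ∀ t, t ≤ nums.length → ∀ i, i < t →
    (((pvDict nums t).getD (nums.getD i 0) (-1) = (i : Int)) ↔
      nums.getD i 0 ∉ (nums.take t).drop (i+1)) := by
  intro t
  induction t with
  | zero => intro _ i hi; omega
  | succ t ih =>
    intro ht i hi
    have htl : t < nums.length := by omega
    unfold pvDict
    rw [PySem.Dict.getD_insert]
    rcases Nat.lt_or_ge i t with hlt | hge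
    · have htake : (nums.take (t+1)).drop (i+1) = (nums.take t).drop (i+1) ++ [nums.getD t 0] := by
        have hg : nums.getD t 0 = nums[t] := List.getD_eq_getElem nums 0 htl
        rw [List.take_add_one, List.getElem?_eq_getElem htl]
        rw [List.drop_append_of_le_length (by rw [List.length_take]; omega), hg]
        rfl
      rw [htake]
      by_cases hkey : nums.getD i 0 = nums.getD t 0
      · have hkey' : nums[i]?.getD 0 = nums[t]?.getD 0 := hkey
        rw [if_pos (by rw [hkey])]
        constructor
        · intro h; exact absurd (by exact_mod_cast h) (by omega : ¬ t = i)
        · intro h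
          exact absurd (List.mem_append.mpr (Or.inr (by simp; exact hkey'))) h
      · have hkey' : ¬ nums[i]?.getD 0 = nums[t]?.getD 0 := hkey
        rw [if_neg hkey]
        rw [ih (by omega) i hlt]
        simp [hkey']
    · have hit : i = t := by omega
      subst hit
      rw [if_pos rfl]
      have : (nums.take (i+1)).drop (i+1) = [] := by
        simp
      simp [this]

theorem pv_card_cons (l : List Int) (x : Int) :
    (x :: l).toFinset.card = l.toFinset.card + (if x ∈ l then 0 else 1) := by
  by_cases h : x ∈ l
  · simp [List.toFinset_cons, Finset.insert_eq_self.2 (List.mem_toFinset.2 h), h]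
  · simp [List.toFinset_cons, Finset.card_insert_of_notMem (fun hm => h (List.mem_toFinset.1 hm)), h]

theorem pvDelta_cons (nums : List Int) (i j : ℕ) (hij : i ≤ j) (hj : j < nums.length) :
    pvDelta nums i j = pvDelta nums (i+1) j +
      (if nums.getD i 0 ∉ pvWin nums (i+1) j then (if pvEvenB (nums.getD i 0) then 1 else -1) else 0) := by
  have hi : i < nums.length := by omega
  unfold pvDelta pvDE pvDO
  rw [pvWin_cons nums i j hij hi]
  set x := nums.getD i 0
  set w := pvWin nums (i+1) j
  by_cases hev : pvEvenB x
  · have hfe : (x :: w).filter (fun y => pvEvenB y) = x :: w.filter (fun y => pvEvenB y) := by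
      simp [hev]
    have hfo : (x :: w).filter (fun y => !pvEvenB y) = w.filter (fun y => !pvEvenB y) := by
      simp [hev]
    rw [hfe, hfo, pv_card_cons]
    have hmem : x ∈ w.filter (fun y => pvEvenB y) ↔ x ∈ w := by simp [hev]
    by_cases hm : x ∈ w
    · rw [if_pos (hmem.mpr hm)]
      simp [hm]
    · rw [if_neg (fun h => hm (hmem.mp h))]
      simp [hm, hev]
      ring
  · have hfe : (x :: w).filter (fun y => pvEvenB y) = w.filter (fun y => pvEvenB y) := by
      simp [hev]
    have hfo : (x :: w).filter (fun y => !pvEvenB y) = x :: w.filter (fun y => !pvEvenB y) := by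
      simp [hev]
    rw [hfe, hfo, pv_card_cons]
    have hmem : x ∈ w.filter (fun y => !pvEvenB y) ↔ x ∈ w := by simp [hev]
    by_cases hm : x ∈ w
    · rw [if_pos (hmem.mpr hm)]
      simp [hm]
    · rw [if_neg (fun h => hm (hmem.mp h))]
      simp [hm, hev]
      ring

theorem pv_bodyB (nums : List Int) (i j : ℕ) (b : Int) (hij : i ≤ j) (hj : j < nums.length) :
    pvBodyB nums (pvDict nums (j+1)) (j : Int) (pvDelta nums (i+1) j, b) (i : Int)
    = (pvDelta nums i j,
       if pvDelta nums i j = 0 then max b ((j : Int) - (i : Int) + 1) else b) := by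
  unfold pvBodyB
  have hx : PySem.List.pyGetD nums (i : Int) 0 = nums.getD i 0 := by
    simp [PySem.List.pyGetD_natCast]
  rw [hx]
  have hwin : (nums.take (j+1)).drop (i+1) = pvWin nums (i+1) j := by
    unfold pvWin
    rw [List.drop_take]
  have hcond : ((pvDict nums (j+1)).getD (nums.getD i 0) (-1) = (i : Int)) ↔
      nums.getD i 0 ∉ pvWin nums (i+1) j := by
    rw [pv_getD_pvDict nums (j+1) (by omega) i (by omega), hwin]
  have hbal : (if (pvDict nums (j+1)).getD (nums.getD i 0) (-1) = (i : Int) then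
      pvDelta nums (i+1) j + (if PySem.Int.mod (nums.getD i 0) 2 = 0 then 1 else -1)
      else pvDelta nums (i+1) j) = pvDelta nums i j := by
    rw [pvDelta_cons nums i j hij hj]
    by_cases hc : nums.getD i 0 ∉ pvWin nums (i+1) j
    · rw [if_pos (hcond.mpr hc), if_pos hc]
      congr 1
      by_cases hev : PySem.Int.mod (nums.getD i 0) 2 = 0
      · rw [if_pos hev, if_pos (by
          simp only [pvEvenB, decide_eq_true_eq]; exact hev)]
      · rw [if_neg hev, if_neg (by
          simp only [pvEvenB, decide_eq_true_eq]; exact hev)]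
    · rw [if_neg (fun h => hc (hcond.mp h)), if_neg hc]
      ring
  simp only [hbal]

-- bal = 0 iff the window is balanced iff pvG gives its length
theorem pv_delta_zero (nums : List Int) (i j : ℕ) :
    pvDelta nums i j = 0 ↔ pvDE (pvWin nums i j) = pvDO (pvWin nums i j) := by
  unfold pvDelta; omega

theorem pv_innerB (nums : List Int) (j : ℕ) (hj : j < nums.length) :
    ∀ i, i ≤ j → ∀ b : Int, 0 ≤ b →
    (PySem.List.pyRange (i : Int) (-1) (-1)).foldl (pvBodyB nums (pvDict nums (j+1)) (j : Int))
      (pvDelta nums (i+1) j, b)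
    = (pvDelta nums 0 j, max b (((Finset.range (i+1)).sup (fun i' => pvG nums i' j) : ℕ) : Int)) := by
  intro i
  induction i with
  | zero =>
    intro _ b hb
    have hr : PySem.List.pyRange 0 (-1) (-1) = [0] := by
      rw [PySem.List.pyRange_neg_one_cons (by norm_num)]
      norm_num [PySem.List.pyRange_neg_one_eq_nil]
    simp only [Nat.cast_zero]
    rw [hr]
    show pvBodyB nums (pvDict nums (j+1)) (j : Int) (pvDelta nums 1 j, b) ((0 : ℕ) : Int) = _
    rw [pv_bodyB nums 0 j b (by omega) hj]
    have hsup : (Finset.range 1).sup (fun i' => pvG nums i' j) = pvG nums 0 j := by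
      simp
    rw [hsup]
    by_cases hc : pvDelta nums 0 j = 0
    · rw [if_pos hc]
      have hg : pvG nums 0 j = j - 0 + 1 := by
        simp [pvG, (pv_delta_zero nums 0 j).mp hc]
      rw [hg]
      congr 1
    · rw [if_neg hc]
      have hg : pvG nums 0 j = 0 := by
        simp [pvG]
        intro h
        exact absurd ((pv_delta_zero nums 0 j).mpr h) hc
      rw [hg]
      simp [max_eq_left hb]
  | succ i ih =>
    intro hij b hb
    have hr : PySem.List.pyRange ((i+1 : ℕ) : Int) (-1) (-1)
        = ((i+1 : ℕ) : Int) :: PySem.List.pyRange (i : Int) (-1) (-1) := by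
      push_cast
      rw [PySem.List.pyRange_neg_one_cons (by omega)]
      norm_num
    rw [hr, List.foldl_cons]
    rw [show ((i+1 : ℕ) : Int) = ((i+1 : ℕ) : Int) from rfl]
    rw [pv_bodyB nums (i+1) j b hij hj]
    set b' := if pvDelta nums (i+1) j = 0 then max b ((j : Int) - ((i+1 : ℕ) : Int) + 1) else b with hb'
    have hb'0 : 0 ≤ b' := by
      rw [hb']
      split
      · exact le_max_of_le_left hb
      · exact hb
    rw [ih (by omega) b' hb'0]
    congr 1
    rw [pv_sup_range_succ (i+1) (fun i' => pvG nums i' j)]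
    by_cases hc : pvDelta nums (i+1) j = 0
    · have hg : pvG nums (i+1) j = j - (i+1) + 1 := by
        simp [pvG, hij, (pv_delta_zero nums (i+1) j).mp hc]
      have hgc : ((pvG nums (i+1) j : ℕ) : Int) = (j : Int) - ((i+1 : ℕ) : Int) + 1 := by
        rw [hg]; push_cast; omega
      rw [hb', if_pos hc, Nat.cast_max, hgc, max_assoc]
      congr 1
      exact max_comm _ _
    · have hg : pvG nums (i+1) j = 0 := by
        simp [pvG]
        intro _ h
        exact absurd ((pv_delta_zero nums (i+1) j).mpr h) hc
      rw [hb', if_neg hc, hg]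
      simp

theorem pv_sup_snip (nums : List Int) (t : ℕ) (ht : t < nums.length) :
    (Finset.range (t+1)).sup (fun i' => pvG nums i' t)
    = (Finset.range nums.length).sup (fun i' => pvG nums i' t) := by
  refine le_antisymm (Finset.sup_mono ?_) (Finset.sup_le fun i hi => ?_)
  · intro x hx
    simp only [Finset.mem_range] at *
    omega
  by_cases h : i ≤ t
  · exact Finset.le_sup (f := fun i' => pvG nums i' t) (b := i) (Finset.mem_range.mpr (Nat.lt_succ_of_le h))
  · rw [pvG_zero_of_lt nums i t (by omega)]
    exact Nat.zero_le _

theorem pvDelta_empty (nums : List Int) (j : ℕ) : pvDelta nums (j+1) j = 0 := by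
  simp [pvDelta, pvWin_empty, pvDE, pvDO]

theorem pv_outerB (nums : List Int) :
    ∀ t, t ≤ nums.length →
    (PySem.List.pyRange 0 (t : Int) 1).foldl (pvStepB nums) (PySem.Dict.empty, 0)
    = (pvDict nums t,
       (((Finset.range t).sup (fun j => (Finset.range nums.length).sup (fun i => pvG nums i j)) : ℕ) : Int)) := by
  intro t
  induction t with
  | zero => intro _; simp [PySem.List.pyRange_one_eq_nil, pvDict]
  | succ t ih =>
    intro ht
    have htl : t < nums.length := by omega
    have hr : PySem.List.pyRange 0 ((t+1 : ℕ) : Int) 1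
        = PySem.List.pyRange 0 (t : Int) 1 ++ [(t : Int)] := by
      push_cast
      exact PySem.List.pyRange_one_succ_right (by positivity)
    rw [hr, List.foldl_append, ih (by omega), List.foldl_cons, List.foldl_nil]
    unfold pvStepB
    have hx : PySem.List.pyGetD nums (t : Int) 0 = nums.getD t 0 := by
      simp [PySem.List.pyGetD_natCast]
    simp only [hx]
    have hdict : (pvDict nums t).insert (nums.getD t 0) (t : Int) = pvDict nums (t+1) := rfl
    rw [hdict]
    have hinit : ((0 : Int), (((Finset.range t).sup (fun j => (Finset.range nums.length).sup (fun i => pvG nums i j)) : ℕ) : Int))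
        = (pvDelta nums (t+1) t, (((Finset.range t).sup (fun j => (Finset.range nums.length).sup (fun i => pvG nums i j)) : ℕ) : Int)) := by
      rw [pvDelta_empty]
    rw [hinit, pv_innerB nums t htl t le_rfl _ (by positivity)]
    rw [pv_sup_snip nums t htl]
    rw [pv_sup_range_succ t (fun j => (Finset.range nums.length).sup (fun i => pvG nums i j))]
    rw [Nat.cast_max]

-- ===== VERDICT (by name: the statement is the Claim_ definition above) =====
theorem longestBalanced_spec : Claim_equal_longestBalanced := by
  intro nums _
  unfold Spec_longestBalanced longestBalanced longestBalanced_alt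
  rw [pv_outerA nums nums.length le_rfl, pv_outerB nums nums.length le_rfl]
  have h := (Finset.sup_product_left (Finset.range nums.length) (Finset.range nums.length)
      (fun p => pvG nums p.1 p.2)).symm.trans
    (Finset.sup_product_right (Finset.range nums.length) (Finset.range nums.length)
      (fun p => pvG nums p.1 p.2))
  simpa using congrArg (fun k : ℕ => (k : Int)) h
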